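-- pv_equiv track=rewrite | github.com/cassi35/python_exercises | exercicios/e3.py | calculate_card_points
-- ===== SOURCE A (Python) =====
-- def calculate_card_points(cards):
--     total_pontos = 0
--     for card in cards:
--         num_premiados = set(card[0])  # Usando set para facilitar a busca
--         nums = card[1]
--         pontuacao_do_cartao = 0
--         multiplicador = 1
--         for num in nums:
--             if num in num_premiados:
--                 pontuacao_do_cartao += multiplicador
--                 multiplicador *= 2  # Dobra o valor para o próximo acerto
--                 num_premiados.remove(num)  # Remove para evitar contagem duplicada
--         total_pontos += pontuacao_do_cartao
--     return total_pontos
-- ===== SOURCE B (Python) =====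
-- def calculate_card_points(cards):
--     # points per card: matching m distinct winning numbers gives 1+2+...+2**(m-1) = 2**m - 1
--     return sum(2 ** len(set(card[1]) & set(card[0])) - 1 for card in cards)
-- ===== Notes on version B (the rewrite author's own statement) =====
-- stated objective: simpler
-- what changed: Replaces the per-number doubling loop with growing multiplier and set removal by the closed form 2**m - 1 per card, where m is the size of the intersection of the two number sets, summed in one expression.
import Mathlib
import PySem

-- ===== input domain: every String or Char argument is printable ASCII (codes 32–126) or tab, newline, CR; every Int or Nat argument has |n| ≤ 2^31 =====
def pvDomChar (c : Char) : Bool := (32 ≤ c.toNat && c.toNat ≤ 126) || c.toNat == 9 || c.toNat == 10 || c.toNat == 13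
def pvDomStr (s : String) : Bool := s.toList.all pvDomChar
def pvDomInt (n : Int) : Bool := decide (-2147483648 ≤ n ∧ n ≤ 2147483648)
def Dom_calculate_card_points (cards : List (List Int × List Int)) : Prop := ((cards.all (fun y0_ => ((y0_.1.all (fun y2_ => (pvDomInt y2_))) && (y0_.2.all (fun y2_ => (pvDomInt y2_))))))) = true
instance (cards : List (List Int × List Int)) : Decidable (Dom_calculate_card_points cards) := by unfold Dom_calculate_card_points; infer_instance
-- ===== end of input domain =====

-- B replaces A's doubling loop with set mutation by the closed form 2^m - 1 per card (simpler, same cost).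

-- ===== PORT A =====
-- inner 'for num in nums' loop; 'num_premiados.remove(num)' is guarded by 'num in num_premiados',
-- so PySem.Set.discard is exact there (discard = remove of a present element)
def pvCardLoop (s : PySem.Set Int) (nums : List Int) (p mult : Int) : Int :=
  match nums with
  | [] => p
  | n :: t =>
      if n ∈ s then pvCardLoop (PySem.Set.discard s n) t (p + mult) (mult * 2)
      else pvCardLoop s t p mult

def calculate_card_points (cards : List (List Int × List Int)) : Int :=
  cards.foldl (fun total card => total + pvCardLoop (PySem.Set.ofList card.1) card.2 0 1) 0

-- ===== PORT B =====
def calculate_card_points_alt (cards : List (List Int × List Int)) : Int :=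
  cards.foldl
    (fun total card =>
      total + (2 ^ (PySem.Set.inter (PySem.Set.ofList card.2) (PySem.Set.ofList card.1)).length - 1)) 0

-- ===== PRECONDITION & SPEC =====
def Spec_calculate_card_points (cards : List (List Int × List Int)) (out : Int) : Prop := out = calculate_card_points_alt cards
instance (cards : List (List Int × List Int)) (out : Int) : Decidable (Spec_calculate_card_points cards out) := by unfold Spec_calculate_card_points; infer_instance

-- ===== CLAIM (what is proved, stated in full; the proofs are below) =====
def Claim_equal_calculate_card_points : Prop := ∀ (cards : List (List Int × List Int)), Dom_calculate_card_points cards → Spec_calculate_card_points cards (calculate_card_points cards)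

-- ===== LEMMAS AND PROOFS =====

-- number of hits of A's inner loop (each hit removes the number from the set)
def pvHits (s : PySem.Set Int) (nums : List Int) : Nat :=
  match nums with
  | [] => 0
  | n :: t => if n ∈ s then pvHits (PySem.Set.discard s n) t + 1 else pvHits s t

theorem pvCardLoop_eq_hits (nums : List Int) : ∀ (s : PySem.Set Int) (p mult : Int),
    pvCardLoop s nums p mult = p + mult * (2 ^ pvHits s nums - 1) := by
  induction nums with
  | nil => intro s p mult; simp [pvCardLoop, pvHits]
  | cons n t ih =>
    intro s p mult
    by_cases h : n ∈ s
    · simp only [pvCardLoop, pvHits, if_pos h, ih, pow_succ]; ring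
    · simp only [pvCardLoop, pvHits, if_neg h, ih]

theorem pvHits_eq_filter (nums : List Int) : ∀ (s : PySem.Set Int), s.Nodup →
    pvHits s nums = (s.filter (fun a => decide (a ∈ nums))).length := by
  induction nums with
  | nil => intro s _; simp [pvHits]
  | cons n t ih =>
    intro s hs
    by_cases h : n ∈ s
    · have hd : (PySem.Set.discard s n).Nodup := PySem.Set.nodup_discard s n hs
      have hperm :
          (s.filter (fun a => decide (a ∈ n :: t))).Perm
            (n :: (PySem.Set.discard s n).filter (fun a => decide (a ∈ t))) := by
        apply (List.perm_ext_iff_of_nodup (hs.filter _) ?_).2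
        · intro a
          simp only [List.mem_filter, List.mem_cons, PySem.Set.mem_discard, decide_eq_true_eq]
          constructor
          · rintro ⟨ha, h1 | h2⟩
            · left; exact h1
            · by_cases han : a = n
              · left; exact han
              · right; exact ⟨⟨ha, han⟩, h2⟩
          · rintro (rfl | ⟨⟨ha, _⟩, ht⟩)
            · exact ⟨h, Or.inl rfl⟩
            · exact ⟨ha, Or.inr ht⟩
        · refine List.nodup_cons.2 ⟨?_, hd.filter _⟩
          simp [List.mem_filter, PySem.Set.mem_discard]
      simp only [pvHits, if_pos h, ih _ hd, hperm.length_eq, List.length_cons]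
    · have hcong : s.filter (fun a => decide (a ∈ n :: t)) = s.filter (fun a => decide (a ∈ t)) := by
        apply List.filter_congr
        intro a ha
        have : a ≠ n := fun e => h (e ▸ ha)
        simp [List.mem_cons, this]
      simp only [pvHits, if_neg h, ih _ hs, hcong]

theorem pvFilter_eq_inter (c1 c2 : List Int) :
    ((PySem.Set.ofList c1).filter (fun a => decide (a ∈ c2))).length
      = (PySem.Set.inter (PySem.Set.ofList c2) (PySem.Set.ofList c1)).length := by
  have h1 : ((PySem.Set.ofList c1).filter (fun a => decide (a ∈ c2))).Nodup :=
    (PySem.Set.nodup_ofList c1).filter _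
  have h2 : (PySem.Set.inter (PySem.Set.ofList c2) (PySem.Set.ofList c1)).Nodup :=
    PySem.Set.nodup_inter _ _ (PySem.Set.nodup_ofList c2)
  refine List.Perm.length_eq ((List.perm_ext_iff_of_nodup h1 h2).2 ?_)
  intro a
  simp only [List.mem_filter, PySem.Set.mem_inter, PySem.Set.mem_ofList, decide_eq_true_eq]
  tauto

theorem pvCard_eq (card : List Int × List Int) :
    pvCardLoop (PySem.Set.ofList card.1) card.2 0 1
      = 2 ^ (PySem.Set.inter (PySem.Set.ofList card.2) (PySem.Set.ofList card.1)).length - 1 := by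
  rw [pvCardLoop_eq_hits, pvHits_eq_filter _ _ (PySem.Set.nodup_ofList _), pvFilter_eq_inter]
  ring

-- ===== VERDICT (by name: the statement is the Claim_ definition above) =====
theorem calculate_card_points_spec : Claim_equal_calculate_card_points := by
  intro cards _
  unfold Spec_calculate_card_points calculate_card_points calculate_card_points_alt
  congr 1
  funext total card
  rw [pvCard_eq]
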